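-- pv_equiv track=rewrite | github.com/DazKingPin/ProductProAI- | backend/services/design_engine/compliance_checker.py | _is_certification_applicable
-- ===== SOURCE A (Python) =====
-- def _is_certification_applicable(cert_id, cert_data, attributes, regions):
--     """
--     Determine if a certification is applicable to a product.
--
--     Args:
--         cert_id (str): Certification identifier
--         cert_data (dict): Certification data
--         attributes (dict): Product attributes
--         regions (list): Target regions
--
--     Returns:
--         bool: True if certification is applicable, False otherwise
--     """
--     # Check certification applicability based on attributes and regions
--     if cert_id == 'ansi_bifma':
--         # Applicable for commercial furniture
--         return 'commercial' in attributes.get('market_segment', '').lower()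
--
--     elif cert_id == 'greenguard':
--         # Applicable for indoor products
--         return attributes.get('indoor_use', False)
--
--     elif cert_id == 'fsc':
--         # Applicable for products containing wood
--         return 'wood' in attributes.get('materials', [])
--
--     elif cert_id == 'energy_star':
--         # Applicable for energy-consuming products in North America
--         return attributes.get('energy_consuming', False) and any(r.lower() in ['north_america', 'usa', 'canada'] for r in regions)
--
--     elif cert_id == 'ul':
--         # Applicable for electrical products
--         return attributes.get('electrical', False)
--
--     elif cert_id == 'fcc':
--         # Applicable for electronic products in North America
--         return attributes.get('electronic', False) and any(r.lower() in ['north_america', 'usa'] for r in regions)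
--
--     elif cert_id == 'sustainable_packaging_coalition':
--         # Applicable for packaging products
--         return 'packaging' in attributes.get('product_type', '').lower()
--
--     elif cert_id == 'oeko_tex':
--         # Applicable for textile products
--         return 'textile' in attributes.get('materials', [])
--
--     elif cert_id == 'gots':
--         # Applicable for organic textile products
--         return 'textile' in attributes.get('materials', []) and attributes.get('organic', False)
--
--     # Default to True for unknown certifications
--     return True
-- ===== SOURCE B (Python) =====
-- # Data-driven re-implementation: each certification is a list of declarative
-- # atomic conditions interpreted by _holds; unknown certifications default True.
-- _RULES = {
--     'ansi_bifma': [('substr', 'market_segment', 'commercial', True)],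
--     'greenguard': [('truthy', 'indoor_use')],
--     'fsc': [('substr', 'materials', 'wood', False)],
--     'energy_star': [('truthy', 'energy_consuming'), ('region', ('north_america', 'usa', 'canada'))],
--     'ul': [('truthy', 'electrical')],
--     'fcc': [('truthy', 'electronic'), ('region', ('north_america', 'usa'))],
--     'sustainable_packaging_coalition': [('substr', 'product_type', 'packaging', True)],
--     'oeko_tex': [('substr', 'materials', 'textile', False)],
--     'gots': [('substr', 'materials', 'textile', False), ('truthy', 'organic')],
-- }
--
--
-- def _holds(cond, attributes, regions):
--     kind = cond[0]
--     if kind == 'substr':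
--         _, key, needle, fold = cond
--         value = attributes.get(key)
--         if value is None:
--             return False
--         return needle in (value.lower() if fold else value)
--     if kind == 'truthy':
--         return bool(attributes.get(cond[1], False))
--     allowed = cond[1]
--     return any(r.lower() in allowed for r in regions)
--
--
-- def _is_certification_applicable(cert_id, cert_data, attributes, regions):
--     rules = _RULES.get(cert_id)
--     if rules is None:
--         return True
--     return all(_holds(c, attributes, regions) for c in rules)
-- ===== Notes on version B (the rewrite author's own statement) =====
-- stated objective: alternative
-- what changed: Replaced the nine-branch elif chain by a declarative table mapping each certification id to a list of atomic conditions (attribute-substring, attribute-truthiness, region-membership) evaluated by a small generic interpreter; unknown ids fall through the table lookup to True.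
-- outside the precondition, e.g. on _is_certification_applicable('greenguard', {}, {'indoor_use': 'yes'}, []): A returns 'yes', B returns True; on _is_certification_applicable('energy_star', {}, {'energy_consuming': ''}, ['usa']): A returns '', B returns False; on _is_certification_applicable('gots', {}, {'materials': 'textile', 'organic': 'y'}, []): A returns 'y', B returns True
import Mathlib
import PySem

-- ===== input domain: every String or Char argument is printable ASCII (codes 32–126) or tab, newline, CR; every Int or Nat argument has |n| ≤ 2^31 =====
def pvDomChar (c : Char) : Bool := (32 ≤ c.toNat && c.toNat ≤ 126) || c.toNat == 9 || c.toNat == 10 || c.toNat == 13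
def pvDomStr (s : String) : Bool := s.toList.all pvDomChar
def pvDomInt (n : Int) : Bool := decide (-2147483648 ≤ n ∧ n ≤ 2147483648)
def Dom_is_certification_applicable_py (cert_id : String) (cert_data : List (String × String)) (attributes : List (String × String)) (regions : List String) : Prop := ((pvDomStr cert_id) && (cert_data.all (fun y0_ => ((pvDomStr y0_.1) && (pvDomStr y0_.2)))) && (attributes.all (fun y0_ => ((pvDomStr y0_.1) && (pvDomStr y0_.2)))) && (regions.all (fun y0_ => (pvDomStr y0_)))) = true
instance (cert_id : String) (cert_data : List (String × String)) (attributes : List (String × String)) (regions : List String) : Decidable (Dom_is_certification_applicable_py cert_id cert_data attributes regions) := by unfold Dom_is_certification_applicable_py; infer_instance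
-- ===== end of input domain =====

-- B replaces A's elif chain by a declarative table of atomic conditions and a small
-- interpreter (objective: alternative, data-driven structure; no speed claim).
-- Equivalence is about the RETURN value; neither program mutates its arguments.

-- ===== PORT A =====
-- Python truthiness of an attribute string fetched by .get(k, False): present and non-empty.
def pvTruthyGet (a : PySem.Dict String String) (k : String) : Bool :=
  match a.get? k with
  | some v => v != ""
  | none => false

def is_certification_applicable_py (cert_id : String) (cert_data : List (String × String)) (attributes : List (String × String)) (regions : List String) : Bool :=
  let a := PySem.Dict.ofList attributes
  if cert_id == "ansi_bifma" then
    PySem.Str.isIn "commercial" (PySem.Str.lower (a.getD "market_segment" ""))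
  else if cert_id == "greenguard" then
    pvTruthyGet a "indoor_use"
  else if cert_id == "fsc" then
    (match a.get? "materials" with
     | some v => PySem.Str.isIn "wood" v
     | none => false)
  else if cert_id == "energy_star" then
    pvTruthyGet a "energy_consuming" &&
      regions.any (fun r => ["north_america", "usa", "canada"].contains (PySem.Str.lower r))
  else if cert_id == "ul" then
    pvTruthyGet a "electrical"
  else if cert_id == "fcc" then
    pvTruthyGet a "electronic" &&
      regions.any (fun r => ["north_america", "usa"].contains (PySem.Str.lower r))
  else if cert_id == "sustainable_packaging_coalition" then
    PySem.Str.isIn "packaging" (PySem.Str.lower (a.getD "product_type" ""))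
  else if cert_id == "oeko_tex" then
    (match a.get? "materials" with
     | some v => PySem.Str.isIn "textile" v
     | none => false)
  else if cert_id == "gots" then
    (match a.get? "materials" with
     | some v => PySem.Str.isIn "textile" v
     | none => false) && pvTruthyGet a "organic"
  else
    true

-- ===== PORT B =====
-- one atomic condition of a certification rule (mirrors the tuples in Source B's _RULES)
inductive PvCond where
  | substr : String → String → Bool → PvCond   -- key, needle, case-fold
  | truthy : String → PvCond                   -- key
  | region : List String → PvCond              -- allowed (lowered) region names
deriving DecidableEq, Repr

def pvRules : PySem.Dict String (List PvCond) := PySem.Dict.ofList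
  [ ("ansi_bifma", [PvCond.substr "market_segment" "commercial" true])
  , ("greenguard", [PvCond.truthy "indoor_use"])
  , ("fsc", [PvCond.substr "materials" "wood" false])
  , ("energy_star", [PvCond.truthy "energy_consuming", PvCond.region ["north_america", "usa", "canada"]])
  , ("ul", [PvCond.truthy "electrical"])
  , ("fcc", [PvCond.truthy "electronic", PvCond.region ["north_america", "usa"]])
  , ("sustainable_packaging_coalition", [PvCond.substr "product_type" "packaging" true])
  , ("oeko_tex", [PvCond.substr "materials" "textile" false])
  , ("gots", [PvCond.substr "materials" "textile" false, PvCond.truthy "organic"])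
  ]

def pvHolds (cond : PvCond) (attributes : PySem.Dict String String) (regions : List String) : Bool :=
  match cond with
  | PvCond.substr key needle fold =>
      match attributes.get? key with
      | none => false
      | some value => PySem.Str.isIn needle (if fold then PySem.Str.lower value else value)
  | PvCond.truthy key =>
      match attributes.get? key with
      | some v => v != ""
      | none => false
  | PvCond.region allowed =>
      regions.any (fun r => allowed.contains (PySem.Str.lower r))

def is_certification_applicable_py_alt (cert_id : String) (cert_data : List (String × String)) (attributes : List (String × String)) (regions : List String) : Bool :=
  match pvRules.get? cert_id with
  | none => true
  | some rules => rules.all (fun c => pvHolds c (PySem.Dict.ofList attributes) regions)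

-- ===== PRECONDITION & SPEC =====
-- Pre_ excludes exactly the inputs on which the Python A returns a raw attribute STRING (or '')
-- instead of a bool — a value outside the declared return type Bool: greenguard/ul with their key
-- present, energy_star/fcc with their key present and empty, and gots with a 'textile' material
-- and the 'organic' key present.
def Pre_is_certification_applicable_py (cert_id : String) (cert_data : List (String × String)) (attributes : List (String × String)) (regions : List String) : Prop :=
  let a := PySem.Dict.ofList attributes
  ¬ ((cert_id = "greenguard" ∧ a.contains "indoor_use" = true) ∨
     (cert_id = "ul" ∧ a.contains "electrical" = true) ∨
     (cert_id = "energy_star" ∧ a.get? "energy_consuming" = some "") ∨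
     (cert_id = "fcc" ∧ a.get? "electronic" = some "") ∨
     (cert_id = "gots" ∧ (∃ v, a.get? "materials" = some v ∧ PySem.Str.isIn "textile" v = true) ∧ a.contains "organic" = true))
instance (cert_id : String) (cert_data : List (String × String)) (attributes : List (String × String)) (regions : List String) : Decidable (Pre_is_certification_applicable_py cert_id cert_data attributes regions) := by unfold Pre_is_certification_applicable_py; infer_instance

def pvWitness_is_certification_applicable_py : String × (List (String × String)) × (List (String × String)) × List String :=
  ("energy_star", [], [("energy_consuming", "yes")], ["USA"])

def Spec_is_certification_applicable_py (cert_id : String) (cert_data : List (String × String)) (attributes : List (String × String)) (regions : List String) (out : Bool) : Prop := out = is_certification_applicable_py_alt cert_id cert_data attributes regions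
instance (cert_id : String) (cert_data : List (String × String)) (attributes : List (String × String)) (regions : List String) (out : Bool) : Decidable (Spec_is_certification_applicable_py cert_id cert_data attributes regions out) := by unfold Spec_is_certification_applicable_py; infer_instance

-- ===== CLAIM (what is proved, stated in full; the proofs are below) =====
def Claim_equal_is_certification_applicable_py : Prop := ∀ (cert_id : String) (cert_data : List (String × String)) (attributes : List (String × String)) (regions : List String), Dom_is_certification_applicable_py cert_id cert_data attributes regions → Pre_is_certification_applicable_py cert_id cert_data attributes regions → Spec_is_certification_applicable_py cert_id cert_data attributes regions (is_certification_applicable_py cert_id cert_data attributes regions)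

-- ===== LEMMAS AND PROOFS =====
theorem pvRules_get?_other (cert_id : String)
    (h1 : cert_id ≠ "ansi_bifma") (h2 : cert_id ≠ "greenguard") (h3 : cert_id ≠ "fsc")
    (h4 : cert_id ≠ "energy_star") (h5 : cert_id ≠ "ul") (h6 : cert_id ≠ "fcc")
    (h7 : cert_id ≠ "sustainable_packaging_coalition") (h8 : cert_id ≠ "oeko_tex")
    (h9 : cert_id ≠ "gots") : pvRules.get? cert_id = none := by
  rw [PySem.Dict.get?_eq_none_iff_not_mem_keys]
  intro hmem
  have : pvRules.keys = ["ansi_bifma", "greenguard", "fsc", "energy_star", "ul", "fcc",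
      "sustainable_packaging_coalition", "oeko_tex", "gots"] := by decide
  rw [this] at hmem
  simp only [List.mem_cons, List.not_mem_nil] at hmem
  rcases hmem with h | h | h | h | h | h | h | h | h | h <;> first | exact absurd h ‹_› | exact h

-- ===== VERDICT (by name: the statement is the Claim_ definition above) =====
theorem is_certification_applicable_py_spec : Claim_equal_is_certification_applicable_py := by
  intro cert_id cert_data attributes regions _hdom _hpre
  unfold Spec_is_certification_applicable_py
  unfold is_certification_applicable_py is_certification_applicable_py_alt
  by_cases h1 : cert_id = "ansi_bifma"
  · subst h1
    rw [show pvRules.get? "ansi_bifma" = some [PvCond.substr "market_segment" "commercial" true] from by decide]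
    simp [pvHolds, PySem.Dict.getD_eq_get?_getD]
    cases (PySem.Dict.ofList attributes).get? "market_segment"
    · decide
    · simp
  by_cases h2 : cert_id = "greenguard"
  · subst h2
    rw [show pvRules.get? "greenguard" = some [PvCond.truthy "indoor_use"] from by decide]
    simp [pvHolds, pvTruthyGet, h1]
  by_cases h3 : cert_id = "fsc"
  · subst h3
    rw [show pvRules.get? "fsc" = some [PvCond.substr "materials" "wood" false] from by decide]
    simp [pvHolds, h1, h2]
    cases (PySem.Dict.ofList attributes).get? "materials" <;> simp
  by_cases h4 : cert_id = "energy_star"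
  · subst h4
    rw [show pvRules.get? "energy_star" = some [PvCond.truthy "energy_consuming", PvCond.region ["north_america", "usa", "canada"]] from by decide]
    simp [pvHolds, pvTruthyGet, h1, h2, h3]
  by_cases h5 : cert_id = "ul"
  · subst h5
    rw [show pvRules.get? "ul" = some [PvCond.truthy "electrical"] from by decide]
    simp [pvHolds, pvTruthyGet, h1, h2, h3, h4]
  by_cases h6 : cert_id = "fcc"
  · subst h6
    rw [show pvRules.get? "fcc" = some [PvCond.truthy "electronic", PvCond.region ["north_america", "usa"]] from by decide]
    simp [pvHolds, pvTruthyGet, h1, h2, h3, h4, h5]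
  by_cases h7 : cert_id = "sustainable_packaging_coalition"
  · subst h7
    rw [show pvRules.get? "sustainable_packaging_coalition" = some [PvCond.substr "product_type" "packaging" true] from by decide]
    simp [pvHolds, PySem.Dict.getD_eq_get?_getD, h1, h2, h3, h4, h5, h6]
    cases (PySem.Dict.ofList attributes).get? "product_type"
    · decide
    · simp
  by_cases h8 : cert_id = "oeko_tex"
  · subst h8
    rw [show pvRules.get? "oeko_tex" = some [PvCond.substr "materials" "textile" false] from by decide]
    simp [pvHolds, h1, h2, h3, h4, h5, h6, h7]
    cases (PySem.Dict.ofList attributes).get? "materials" <;> simp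
  by_cases h9 : cert_id = "gots"
  · subst h9
    rw [show pvRules.get? "gots" = some [PvCond.substr "materials" "textile" false, PvCond.truthy "organic"] from by decide]
    simp [pvHolds, pvTruthyGet, h1, h2, h3, h4, h5, h6, h7, h8]
    cases (PySem.Dict.ofList attributes).get? "materials" <;> simp
  rw [pvRules_get?_other cert_id h1 h2 h3 h4 h5 h6 h7 h8 h9]
  simp [h1, h2, h3, h4, h5, h6, h7, h8, h9]
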